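-- pv_equiv track=rewrite | github.com/guylain237/projets_nobels | src/data_collection/scrapers/welcome_jungle.py | normalize_contract_type
-- ===== SOURCE A (Python) =====
-- def normalize_contract_type(contract_type):
--     """Normalise le type de contrat pour assurer la cohérence des données."""
--     if not contract_type:
--         return "Type de contrat non spécifié"
--
--     contract_type = contract_type.lower()
--
--     # Normalisation des types de contrats
--     if any(term in contract_type for term in ["cdi", "permanent", "indéterminé", "indetermine", "indefinite"]):
--         return "CDI"
--     elif any(term in contract_type for term in ["cdd", "fixed", "déterminé", "determine", "temporary"]):
--         return "CDD"
--     elif any(term in contract_type for term in ["stage", "intern", "internship"]):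
--         return "Stage"
--     elif any(term in contract_type for term in ["freelance", "indépendant", "independant", "contractor"]):
--         return "Freelance"
--     elif any(term in contract_type for term in ["alternance", "apprentissage", "apprenticeship", "alternating"]):
--         return "Alternance"
--     elif any(term in contract_type for term in ["temps partiel", "part time", "part-time"]):
--         return "Temps partiel"
--     elif any(term in contract_type for term in ["vdi", "vendeur", "indépendant"]):
--         return "VDI"
--     else:
--         return contract_type.capitalize()  # Conserver le type d'origine si aucune correspondance
-- ===== SOURCE B (Python) =====
-- _LABELS = ["CDI", "CDD", "Stage", "Freelance", "Alternance", "Temps partiel", "VDI"]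
--
-- _RANK = {}
-- for _r, _kws in enumerate([
--     ("cdi", "permanent", "ind\u00e9termin\u00e9", "indetermine", "indefinite"),
--     ("cdd", "fixed", "d\u00e9termin\u00e9", "determine", "temporary"),
--     ("stage", "intern", "internship"),
--     ("freelance", "ind\u00e9pendant", "independant", "contractor"),
--     ("alternance", "apprentissage", "apprenticeship", "alternating"),
--     ("temps partiel", "part time", "part-time"),
--     ("vdi", "vendeur", "ind\u00e9pendant"),
-- ]):
--     for _kw in _kws:
--         _RANK.setdefault(_kw, _r)
--
--
-- def normalize_contract_type(contract_type):
--     """Normalise le type de contrat: argmin of keyword priorities instead of an elif chain."""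
--     if not contract_type:
--         return "Type de contrat non sp\u00e9cifi\u00e9"
--     low = contract_type.lower()
--     best = min((r for kw, r in _RANK.items() if kw in low), default=None)
--     return low.capitalize() if best is None else _LABELS[best]
-- ===== Notes on version B (the rewrite author's own statement) =====
-- stated objective: alternative
-- what changed: Instead of an ordered if/elif chain of group tests, B builds a flat keyword->priority map (first occurrence wins) and returns the label of the minimum priority among all matching keywords (argmin over one flat scan), which coincides with first-match because priorities mirror the branch order.
import Mathlib
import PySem

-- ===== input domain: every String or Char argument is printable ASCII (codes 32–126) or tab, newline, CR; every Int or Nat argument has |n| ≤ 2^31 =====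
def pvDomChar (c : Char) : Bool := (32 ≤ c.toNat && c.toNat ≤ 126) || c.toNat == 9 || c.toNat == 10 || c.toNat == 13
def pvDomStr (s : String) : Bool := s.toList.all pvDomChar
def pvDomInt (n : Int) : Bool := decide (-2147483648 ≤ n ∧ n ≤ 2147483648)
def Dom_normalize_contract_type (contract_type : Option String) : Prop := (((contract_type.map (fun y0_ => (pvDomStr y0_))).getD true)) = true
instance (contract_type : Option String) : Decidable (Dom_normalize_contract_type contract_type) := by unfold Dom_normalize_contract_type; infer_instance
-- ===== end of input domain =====

-- B replaces the ordered if/elif chain by an argmin over a flat keyword→priority map; same cost (alternative).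

-- s.capitalize() (exact on ASCII): first char uppercased, rest lowercased (shared primitive, PySem has no capitalize)
def pyCapitalize : List Char → List Char
  | [] => []
  | c :: t => PySem.Chars.upperChar c :: PySem.Chars.lower t

-- ===== PORT A =====
def normalize_contract_type (contract_type : Option String) : String :=
  match contract_type with
  | none => "Type de contrat non spécifié"
  | some s =>
    if s = "" then "Type de contrat non spécifié"
    else
      let ct := PySem.Str.lower s
      if ["cdi", "permanent", "indéterminé", "indetermine", "indefinite"].any (fun t => PySem.Str.isIn t ct) then "CDI"
      else if ["cdd", "fixed", "déterminé", "determine", "temporary"].any (fun t => PySem.Str.isIn t ct) then "CDD"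
      else if ["stage", "intern", "internship"].any (fun t => PySem.Str.isIn t ct) then "Stage"
      else if ["freelance", "indépendant", "independant", "contractor"].any (fun t => PySem.Str.isIn t ct) then "Freelance"
      else if ["alternance", "apprentissage", "apprenticeship", "alternating"].any (fun t => PySem.Str.isIn t ct) then "Alternance"
      else if ["temps partiel", "part time", "part-time"].any (fun t => PySem.Str.isIn t ct) then "Temps partiel"
      else if ["vdi", "vendeur", "indépendant"].any (fun t => PySem.Str.isIn t ct) then "VDI"
      else String.ofList (pyCapitalize ct.toList)

-- ===== PORT B =====
def ctLabels : List String := ["CDI", "CDD", "Stage", "Freelance", "Alternance", "Temps partiel", "VDI"]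

-- items of the module-level dict _RANK in insertion order; setdefault keeps the FIRST rank,
-- so "indépendant" appears once, at rank 3, and not again at rank 6
def ctRank : List (String × Int) :=
  [("cdi", 0), ("permanent", 0), ("indéterminé", 0), ("indetermine", 0), ("indefinite", 0),
   ("cdd", 1), ("fixed", 1), ("déterminé", 1), ("determine", 1), ("temporary", 1),
   ("stage", 2), ("intern", 2), ("internship", 2),
   ("freelance", 3), ("indépendant", 3), ("independant", 3), ("contractor", 3),
   ("alternance", 4), ("apprentissage", 4), ("apprenticeship", 4), ("alternating", 4),
   ("temps partiel", 5), ("part time", 5), ("part-time", 5),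
   ("vdi", 6), ("vendeur", 6)]

def normalize_contract_type_alt (contract_type : Option String) : String :=
  match contract_type with
  | none => "Type de contrat non spécifié"
  | some s =>
    if s = "" then "Type de contrat non spécifié"
    else
      let low := PySem.Str.lower s
      -- min((r for kw, r in _RANK.items() if kw in low), default=None)
      match PySem.List.min? ((ctRank.filter (fun p => PySem.Str.isIn p.1 low)).map (fun p => p.2)) (fun y => y) with
      | none => String.ofList (pyCapitalize low.toList)
      | some r =>
        match PySem.List.pyGet? ctLabels r with   -- _LABELS[best]
        | some lab => lab
        | none => ""    -- unreachable (r ∈ [0,6]); totality guard only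

-- ===== PRECONDITION & SPEC =====
def Spec_normalize_contract_type (contract_type : Option String) (out : String) : Prop := out = normalize_contract_type_alt contract_type
instance (contract_type : Option String) (out : String) : Decidable (Spec_normalize_contract_type contract_type out) := by unfold Spec_normalize_contract_type; infer_instance

-- ===== CLAIM (what is proved, stated in full; the proofs are below) =====
def Claim_equal_normalize_contract_type : Prop := ∀ (contract_type : Option String), Dom_normalize_contract_type contract_type → Spec_normalize_contract_type contract_type (normalize_contract_type contract_type)

-- ===== LEMMAS AND PROOFS =====

-- the rank table viewed as rank-labelled groups
def ctGroups : List (List String × Int) :=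
  [ (["cdi", "permanent", "indéterminé", "indetermine", "indefinite"], 0),
    (["cdd", "fixed", "déterminé", "determine", "temporary"], 1),
    (["stage", "intern", "internship"], 2),
    (["freelance", "indépendant", "independant", "contractor"], 3),
    (["alternance", "apprentissage", "apprenticeship", "alternating"], 4),
    (["temps partiel", "part time", "part-time"], 5),
    (["vdi", "vendeur"], 6) ]

def flatGroups (gs : List (List String × Int)) : List (String × Int) :=
  gs.flatMap (fun p => p.1.map (fun kw => (kw, p.2)))

-- first group (in order) whose any keyword occurs in low → its rank
def firstRank : List (List String × Int) → String → Option Int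
  | [], _ => none
  | (g, i) :: rest, low =>
    if g.any (fun kw => PySem.Str.isIn kw low) then some i else firstRank rest low

theorem min?_id_eq_of_mem_of_le (L : List Int) (i : Int) (hi : i ∈ L)
    (hall : ∀ x ∈ L, i ≤ x) :
    PySem.List.min? L (fun y => y) = some i := by
  cases h : PySem.List.min? L (fun y => y) with
  | none =>
    rw [PySem.List.min?_eq_none_iff] at h
    subst h; cases hi
  | some m =>
    have hm : m ∈ L := PySem.List.min?_mem h
    have h1 : m ≤ i := PySem.List.min?_isMin h i hi
    have h2 : i ≤ m := hall m hm
    exact congrArg some (le_antisymm h1 h2)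

theorem mem_group_rank {g : List String} {i : Int} {low : String} {x : Int}
    (hx : x ∈ ((g.map (fun kw => (kw, i))).filter
        (fun p => PySem.Str.isIn p.1 low)).map (fun p => p.2)) : x = i := by
  simp only [List.mem_map, List.mem_filter] at hx
  obtain ⟨p, ⟨⟨kw, _, rfl⟩, _⟩, rfl⟩ := hx
  rfl

theorem mem_flat_rank {gs : List (List String × Int)} {low : String} {x : Int}
    (hx : x ∈ ((flatGroups gs).filter (fun p => PySem.Str.isIn p.1 low)).map (fun p => p.2)) :
    ∃ q ∈ gs, x = q.2 := by
  induction gs with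
  | nil => simp [flatGroups] at hx
  | cons q rest ih =>
    simp only [flatGroups, List.flatMap_cons, List.filter_append, List.map_append,
      List.mem_append] at hx
    rcases hx with h | h
    · exact ⟨q, List.mem_cons_self .., mem_group_rank h⟩
    · obtain ⟨q', hq', hxq⟩ := ih h
      exact ⟨q', List.mem_cons_of_mem _ hq', hxq⟩

-- argmin over the flat filtered table = first matching group, when ranks are nondecreasing
theorem min?_flat_eq_firstRank (gs : List (List String × Int)) (low : String)
    (hmono : List.Pairwise (fun a b => a.2 ≤ b.2) gs) :
    PySem.List.min? (((flatGroups gs).filter (fun p => PySem.Str.isIn p.1 low)).map (fun p => p.2))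
      (fun y => y) = firstRank gs low := by
  induction gs with
  | nil => rfl
  | cons q rest ih =>
    obtain ⟨g, i⟩ := q
    rw [List.pairwise_cons] at hmono
    simp only [flatGroups, List.flatMap_cons, List.filter_append, List.map_append, firstRank]
    by_cases hany : g.any (fun kw => PySem.Str.isIn kw low) = true
    · simp only [hany, if_pos]
      obtain ⟨kw, hkw, hin⟩ := List.any_eq_true.mp hany
      apply min?_id_eq_of_mem_of_le
      · apply List.mem_append_left
        simp only [List.mem_map, List.mem_filter]
        exact ⟨(kw, i), ⟨⟨kw, hkw, rfl⟩, hin⟩, rfl⟩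
      · intro x hx
        rcases List.mem_append.mp hx with h | h
        · exact le_of_eq (mem_group_rank h).symm
        · obtain ⟨q', hq', rfl⟩ := mem_flat_rank (gs := rest) h
          exact hmono.1 q' hq'
    · have hg : ((g.map (fun kw => (kw, i))).filter (fun p => PySem.Str.isIn p.1 low)) = [] := by
        rw [List.filter_eq_nil_iff]
        intro p hp
        obtain ⟨kw, hkw, rfl⟩ := List.mem_map.mp hp
        simp only [List.any_eq_true, not_exists, not_and] at hany
        simpa using hany kw hkw
      simp only [hg, List.map_nil, List.nil_append, hany, if_neg, Bool.false_eq_true,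
        not_false_iff]
      exact ih hmono.2

-- ===== VERDICT (by name: the statement is the Claim_ definition above) =====
theorem normalize_contract_type_spec : Claim_equal_normalize_contract_type := by
  intro ct _
  unfold Spec_normalize_contract_type
  match ct with
  | none => rfl
  | some s =>
    by_cases hs : s = ""
    · simp [normalize_contract_type, normalize_contract_type_alt, hs]
    · have htab : ctRank = flatGroups ctGroups := by rfl
      have hmin := min?_flat_eq_firstRank ctGroups (PySem.Str.lower s) (by decide)
      simp only [normalize_contract_type, normalize_contract_type_alt, hs,
        htab, hmin]
      simp only [firstRank, ctGroups]
      split_ifs <;> simp_all [PySem.List.pyGet?, PySem.List.pyIdx?, ctLabels]
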